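-- pv_equiv track=rewrite | github.com/chingelo/Hypnose_rauchfrei | backend/run_session_sandbox.py | _reflect_named_person_for_therapist
-- ===== SOURCE A (Python) =====
-- def _reflect_named_person_for_therapist(text: str) -> str:
--     raw = str(text or "").strip()
--     if not raw:
--         return "diese Person"
--     possessive_map = {
--         "Mein ": "dein ",
--         "Meine ": "deine ",
--         "Meinen ": "deinen ",
--         "Meinem ": "deinem ",
--         "Meiner ": "deiner ",
--         "Meines ": "deines ",
--     }
--     for source, target in possessive_map.items():
--         if raw.startswith(source):
--             return target + raw[len(source) :]
--     return raw
-- ===== SOURCE B (Python) =====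
-- _POSSESSIVE_HEADS = {
--     "Mein": "dein",
--     "Meine": "deine",
--     "Meinen": "deinen",
--     "Meinem": "deinem",
--     "Meiner": "deiner",
--     "Meines": "deines",
-- }
--
--
-- def _reflect_named_person_for_therapist(text: str) -> str:
--     raw = str(text or "").strip()
--     if not raw:
--         return "diese Person"
--     parts = raw.split(" ", 1)
--     if len(parts) == 2:
--         mapped = _POSSESSIVE_HEADS.get(parts[0])
--         if mapped is not None:
--             return mapped + " " + parts[1]
--     return raw
-- ===== Notes on version B (the rewrite author's own statement) =====
-- stated objective: simpler
-- what changed: Instead of looping over six possessive prefixes testing each as a string prefix and re-gluing via slicing, B splits the stripped text once at the first space (maxsplit 1) and maps the first word through a dictionary of possessive heads.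
import Mathlib
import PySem

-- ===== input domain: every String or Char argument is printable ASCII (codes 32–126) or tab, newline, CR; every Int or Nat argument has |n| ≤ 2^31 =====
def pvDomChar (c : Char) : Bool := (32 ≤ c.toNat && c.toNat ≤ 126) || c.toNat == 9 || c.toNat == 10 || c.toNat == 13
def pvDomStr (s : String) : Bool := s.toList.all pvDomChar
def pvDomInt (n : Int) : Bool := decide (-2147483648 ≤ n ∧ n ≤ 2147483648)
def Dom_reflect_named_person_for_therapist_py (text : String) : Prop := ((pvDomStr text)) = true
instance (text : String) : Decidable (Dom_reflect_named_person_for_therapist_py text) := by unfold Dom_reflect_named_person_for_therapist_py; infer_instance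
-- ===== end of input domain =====

-- B replaces A's loop of six "startswith + re-glue" prefix checks by one split(' ', 1)
-- and a dictionary lookup of the first word (objective: simpler decomposition, same cost).

-- ===== PORT A =====
-- literal transliteration of A: strip, empty guard, then the dict loop unrolled in
-- insertion order (each iteration: startswith check, then target + raw[len(source):]).
def reflect_named_person_for_therapist_py (text : String) : String :=
  let raw := PySem.Str.strip text
  if raw = "" then "diese Person"
  else if PySem.Str.startswith raw "Mein " then "dein " ++ PySem.Str.slice raw (some 5) none
  else if PySem.Str.startswith raw "Meine " then "deine " ++ PySem.Str.slice raw (some 6) none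
  else if PySem.Str.startswith raw "Meinen " then "deinen " ++ PySem.Str.slice raw (some 7) none
  else if PySem.Str.startswith raw "Meinem " then "deinem " ++ PySem.Str.slice raw (some 7) none
  else if PySem.Str.startswith raw "Meiner " then "deiner " ++ PySem.Str.slice raw (some 7) none
  else if PySem.Str.startswith raw "Meines " then "deines " ++ PySem.Str.slice raw (some 7) none
  else raw

-- ===== PORT B =====
def pvPossessiveHeads : PySem.Dict String String :=
  PySem.Dict.ofList
    [("Mein", "dein"), ("Meine", "deine"), ("Meinen", "deinen"),
     ("Meinem", "deinem"), ("Meiner", "deiner"), ("Meines", "deines")]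

def reflect_named_person_for_therapist_py_alt (text : String) : String :=
  let raw := PySem.Str.strip text
  if raw = "" then "diese Person"
  else
    match PySem.Str.splitMax? raw " " 1 with
    | some [head, rest] =>
        match PySem.Dict.get? pvPossessiveHeads head with
        | some mapped => mapped ++ " " ++ rest
        | none => raw
    | _ => raw

-- ===== PRECONDITION & SPEC =====
def Spec_reflect_named_person_for_therapist_py (text : String) (out : String) : Prop := out = reflect_named_person_for_therapist_py_alt text
instance (text : String) (out : String) : Decidable (Spec_reflect_named_person_for_therapist_py text out) := by unfold Spec_reflect_named_person_for_therapist_py; infer_instance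

-- ===== CLAIM (what is proved, stated in full; the proofs are below) =====
def Claim_equal_reflect_named_person_for_therapist_py : Prop := ∀ (text : String), Dom_reflect_named_person_for_therapist_py text → Spec_reflect_named_person_for_therapist_py text (reflect_named_person_for_therapist_py text)

-- ===== LEMMAS AND PROOFS =====

-- chars of a literal word are not spaces, checked by Bool evaluation
theorem pv_all_ne_space (w : List Char) (h : w.all (· != ' ') = true) : ∀ c ∈ w, c ≠ ' ' := by
  intro c hc
  simpa using List.all_eq_true.mp h c hc

-- the literal association list behind the dict of possessive heads
theorem pvPossessiveHeadsItems : pvPossessiveHeads = PySem.Dict.mk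
    [("Mein", "dein"), ("Meine", "deine"), ("Meinen", "deinen"),
     ("Meinem", "deinem"), ("Meiner", "deiner"), ("Meines", "deines")] := by decide

-- takeWhile / dropWhile across a space-free word followed by a space
theorem pv_takeWhile_word (w t : List Char) (hw : ∀ c ∈ w, c ≠ ' ') :
    (w ++ ' ' :: t).takeWhile (· != ' ') = w := by
  induction w with
  | nil => simp [List.takeWhile_cons]
  | cons a w' ih =>
      have ha : (a != ' ') = true := by simpa using hw a (by simp)
      simp [List.takeWhile_cons, ha, ih (fun c hc => hw c (by simp [hc]))]

theorem pv_dropWhile_word (w t : List Char) (hw : ∀ c ∈ w, c ≠ ' ') :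
    (w ++ ' ' :: t).dropWhile (· != ' ') = ' ' :: t := by
  induction w with
  | nil => simp [List.dropWhile_cons]
  | cons a w' ih =>
      have ha : (a != ' ') = true := by simpa using hw a (by simp)
      simp [List.dropWhile_cons, ha, ih (fun c hc => hw c (by simp [hc]))]

-- go with maxsplit budget 0: no more splitting, flush cur ++ remaining input.
theorem pv_go_zero (l : List Char) (fuel : Nat) (cur : List Char) (acc : List (List Char)) :
    PySem.Chars.splitOnMax.go [' '] fuel 0 l cur acc = acc.reverse ++ [cur.reverse ++ l] := by
  cases fuel with
  | zero => simp [PySem.Chars.splitOnMax.go]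
  | succ f => cases l <;> simp [PySem.Chars.splitOnMax.go]

-- go with budget 1 splits at the first space (if any).
theorem pv_go_one (l : List Char) : ∀ (fuel : Nat) (cur : List Char) (acc : List (List Char)),
    l.length < fuel →
    PySem.Chars.splitOnMax.go [' '] fuel 1 l cur acc =
      acc.reverse ++ (if ' ' ∈ l
        then [cur.reverse ++ l.takeWhile (· != ' '), (l.dropWhile (· != ' ')).tail]
        else [cur.reverse ++ l]) := by
  induction l with
  | nil =>
      intro fuel cur acc h
      cases fuel with
      | zero => omega
      | succ f => simp [PySem.Chars.splitOnMax.go]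
  | cons c rest ih =>
      intro fuel cur acc h
      cases fuel with
      | zero => omega
      | succ f =>
        by_cases hc : c = ' '
        · subst hc
          simp only [PySem.Chars.splitOnMax.go, List.isPrefixOf, if_neg (by omega : ¬ (1:Nat) = 0)]
          simp [pv_go_zero, List.takeWhile_cons, List.dropWhile_cons]
        · have hcb : (c != ' ') = true := by simpa using hc
          have hp : List.isPrefixOf [' '] (c :: rest) = false := by
            simp [List.isPrefixOf]; exact fun h' => (hc h'.symm).elim
          simp only [PySem.Chars.splitOnMax.go, if_neg (by omega : ¬ (1:Nat) = 0), hp]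
          rw [ih f (c :: cur) acc (by simpa using Nat.lt_of_succ_lt_succ h)]
          by_cases hm : ' ' ∈ rest
          · simp [hcb, hm]
          · simp [hcb, hm]
            exact fun h' => hc h'.symm
-- the full split(' ', 1) on char lists
theorem pv_splitOnMax_one (l : List Char) :
    PySem.Chars.splitOnMax l [' '] 1 =
      (if ' ' ∈ l then [l.takeWhile (· != ' '), (l.dropWhile (· != ' ')).tail] else [l]) := by
  have h := pv_go_one l (l.length + 1) [] [] (by omega)
  simpa [PySem.Chars.splitOnMax] using h

-- a space-free word followed by ' ' is a prefix of l iff l contains a space and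
-- the first word of l is exactly that word
theorem pv_prefix_word_space (w l : List Char) (hw : ∀ c ∈ w, c ≠ ' ') :
    ((w ++ [' ']) <+: l) ↔ (' ' ∈ l ∧ l.takeWhile (· != ' ') = w) := by
  constructor
  · rintro ⟨t, rfl⟩
    refine ⟨by simp, ?_⟩
    simpa using pv_takeWhile_word w t hw
  · rintro ⟨hmem, hTw⟩
    have hsplit : l = l.takeWhile (· != ' ') ++ l.dropWhile (· != ' ') :=
      (List.takeWhile_append_dropWhile).symm
    have hne : l.dropWhile (· != ' ') ≠ [] := by
      intro h0
      have hl : l = l.takeWhile (· != ' ') := by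
        rw [h0, List.append_nil] at hsplit; exact hsplit
      have := List.mem_takeWhile_imp (hl ▸ hmem)
      simp at this
    obtain ⟨d, ds, hd⟩ : ∃ d ds, l.dropWhile (· != ' ') = d :: ds := by
      cases h : l.dropWhile (· != ' ') with
      | nil => exact absurd h hne
      | cons d ds => exact ⟨d, ds, rfl⟩
    have hdsp : d = ' ' := by
      have := List.head_dropWhile_not (· != ' ') (l := l) (by simp [hd])
      simp [hd] at this
      simpa using this
    refine ⟨ds, ?_⟩
    rw [hsplit, hTw, hd, hdsp]
    simp

-- when the first word matches, raw[len(word)+1:] is the tail after the first space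
theorem pv_drop_eq_tail (w l : List Char) (hmem : ' ' ∈ l)
    (hTw : l.takeWhile (· != ' ') = w) (hw : ∀ c ∈ w, c ≠ ' ') :
    l.drop (w.length + 1) = (l.dropWhile (· != ' ')).tail := by
  obtain ⟨t, ht⟩ := (pv_prefix_word_space w l hw).mpr ⟨hmem, hTw⟩
  subst ht
  rw [List.append_assoc, List.singleton_append, pv_dropWhile_word w t hw, List.tail_cons]
  have h2 : List.drop (List.length (w ++ [' '])) ((w ++ [' ']) ++ t) = t := List.drop_left
  simpa using h2

-- ===== VERDICT (by name: the statement is the Claim_ definition above) =====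
set_option maxRecDepth 8192 in
set_option maxHeartbeats 2000000 in
theorem reflect_named_person_for_therapist_py_spec : Claim_equal_reflect_named_person_for_therapist_py := by
  intro text _
  unfold Spec_reflect_named_person_for_therapist_py reflect_named_person_for_therapist_py reflect_named_person_for_therapist_py_alt
  by_cases hraw : PySem.Str.strip text = ""
  · simp [hraw]
  · simp only [hraw, if_false]
    have hstart : ∀ (w : List Char) (s : String), (∀ c ∈ w, c ≠ ' ') → w ++ [' '] = s.toList →
        (PySem.Str.startswith (PySem.Str.strip text) s = true ↔
          (' ' ∈ (PySem.Str.strip text).toList ∧ (PySem.Str.strip text).toList.takeWhile (· != ' ') = w)) := by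
      intro w s hw hs
      rw [PySem.Str.startswith_eq, ← hs]
      exact (PySem.Chars.startswith_iff _ _).trans (pv_prefix_word_space w _ hw)
    have hsplit : PySem.Str.splitMax? (PySem.Str.strip text) " " 1 =
        some ((if ' ' ∈ (PySem.Str.strip text).toList
          then [(PySem.Str.strip text).toList.takeWhile (· != ' '), ((PySem.Str.strip text).toList.dropWhile (· != ' ')).tail]
          else [(PySem.Str.strip text).toList]).map String.ofList) := by
      have ht : (" " : String).toList = [' '] := by decide
      simp [PySem.Str.splitMax?, PySem.Chars.splitMax?, ht, pv_splitOnMax_one]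
    by_cases hm : ' ' ∈ (PySem.Str.strip text).toList
    · rw [hsplit, if_pos hm]
      simp only [List.map_cons, List.map_nil]
      by_cases h1 : (PySem.Str.strip text).toList.takeWhile (· != ' ') = "Mein".toList
      · have hb1 : PySem.Str.startswith (PySem.Str.strip text) "Mein " = true := (hstart "Mein".toList "Mein " (pv_all_ne_space _ (by decide)) (by decide)).mpr ⟨hm, h1⟩
        have hd : (PySem.Str.strip text).toList.drop 5 = ((PySem.Str.strip text).toList.dropWhile (· != ' ')).tail := pv_drop_eq_tail "Mein".toList _ hm h1 (pv_all_ne_space _ (by decide))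
        rw [if_pos hb1]
        rw [show String.ofList ((PySem.Str.strip text).toList.takeWhile (· != ' ')) = "Mein" from by rw [h1, String.ofList_toList]]
        simp only [show PySem.Dict.get? pvPossessiveHeads "Mein" = some "dein" from by decide]
        apply String.toList_inj.mp
        simp only [String.toList_append, PySem.Str.toList_slice, PySem.Chars.slice_eq_listSlice, String.toList_ofList]
        rw [PySem.List.slice_from _ (by norm_num)]
        show ("dein " : String).toList ++ (PySem.Str.strip text).toList.drop 5 = _
        rw [hd]
        simp
      by_cases h2 : (PySem.Str.strip text).toList.takeWhile (· != ' ') = "Meine".toList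
      · have hb1 : ¬ (PySem.Str.startswith (PySem.Str.strip text) "Mein " = true) := fun hx => h1 (((hstart "Mein".toList "Mein " (pv_all_ne_space _ (by decide)) (by decide)).mp hx).2.trans (by decide))
        have hb2 : PySem.Str.startswith (PySem.Str.strip text) "Meine " = true := (hstart "Meine".toList "Meine " (pv_all_ne_space _ (by decide)) (by decide)).mpr ⟨hm, h2⟩
        have hd : (PySem.Str.strip text).toList.drop 6 = ((PySem.Str.strip text).toList.dropWhile (· != ' ')).tail := pv_drop_eq_tail "Meine".toList _ hm h2 (pv_all_ne_space _ (by decide))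
        rw [if_neg hb1, if_pos hb2]
        rw [show String.ofList ((PySem.Str.strip text).toList.takeWhile (· != ' ')) = "Meine" from by rw [h2, String.ofList_toList]]
        simp only [show PySem.Dict.get? pvPossessiveHeads "Meine" = some "deine" from by decide]
        apply String.toList_inj.mp
        simp only [String.toList_append, PySem.Str.toList_slice, PySem.Chars.slice_eq_listSlice, String.toList_ofList]
        rw [PySem.List.slice_from _ (by norm_num)]
        show ("deine " : String).toList ++ (PySem.Str.strip text).toList.drop 6 = _
        rw [hd]
        simp
      by_cases h3 : (PySem.Str.strip text).toList.takeWhile (· != ' ') = "Meinen".toList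
      · have hb1 : ¬ (PySem.Str.startswith (PySem.Str.strip text) "Mein " = true) := fun hx => h1 (((hstart "Mein".toList "Mein " (pv_all_ne_space _ (by decide)) (by decide)).mp hx).2.trans (by decide))
        have hb2 : ¬ (PySem.Str.startswith (PySem.Str.strip text) "Meine " = true) := fun hx => h2 (((hstart "Meine".toList "Meine " (pv_all_ne_space _ (by decide)) (by decide)).mp hx).2.trans (by decide))
        have hb3 : PySem.Str.startswith (PySem.Str.strip text) "Meinen " = true := (hstart "Meinen".toList "Meinen " (pv_all_ne_space _ (by decide)) (by decide)).mpr ⟨hm, h3⟩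
        have hd : (PySem.Str.strip text).toList.drop 7 = ((PySem.Str.strip text).toList.dropWhile (· != ' ')).tail := pv_drop_eq_tail "Meinen".toList _ hm h3 (pv_all_ne_space _ (by decide))
        rw [if_neg hb1, if_neg hb2, if_pos hb3]
        rw [show String.ofList ((PySem.Str.strip text).toList.takeWhile (· != ' ')) = "Meinen" from by rw [h3, String.ofList_toList]]
        simp only [show PySem.Dict.get? pvPossessiveHeads "Meinen" = some "deinen" from by decide]
        apply String.toList_inj.mp
        simp only [String.toList_append, PySem.Str.toList_slice, PySem.Chars.slice_eq_listSlice, String.toList_ofList]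
        rw [PySem.List.slice_from _ (by norm_num)]
        show ("deinen " : String).toList ++ (PySem.Str.strip text).toList.drop 7 = _
        rw [hd]
        simp
      by_cases h4 : (PySem.Str.strip text).toList.takeWhile (· != ' ') = "Meinem".toList
      · have hb1 : ¬ (PySem.Str.startswith (PySem.Str.strip text) "Mein " = true) := fun hx => h1 (((hstart "Mein".toList "Mein " (pv_all_ne_space _ (by decide)) (by decide)).mp hx).2.trans (by decide))
        have hb2 : ¬ (PySem.Str.startswith (PySem.Str.strip text) "Meine " = true) := fun hx => h2 (((hstart "Meine".toList "Meine " (pv_all_ne_space _ (by decide)) (by decide)).mp hx).2.trans (by decide))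
        have hb3 : ¬ (PySem.Str.startswith (PySem.Str.strip text) "Meinen " = true) := fun hx => h3 (((hstart "Meinen".toList "Meinen " (pv_all_ne_space _ (by decide)) (by decide)).mp hx).2.trans (by decide))
        have hb4 : PySem.Str.startswith (PySem.Str.strip text) "Meinem " = true := (hstart "Meinem".toList "Meinem " (pv_all_ne_space _ (by decide)) (by decide)).mpr ⟨hm, h4⟩
        have hd : (PySem.Str.strip text).toList.drop 7 = ((PySem.Str.strip text).toList.dropWhile (· != ' ')).tail := pv_drop_eq_tail "Meinem".toList _ hm h4 (pv_all_ne_space _ (by decide))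
        rw [if_neg hb1, if_neg hb2, if_neg hb3, if_pos hb4]
        rw [show String.ofList ((PySem.Str.strip text).toList.takeWhile (· != ' ')) = "Meinem" from by rw [h4, String.ofList_toList]]
        simp only [show PySem.Dict.get? pvPossessiveHeads "Meinem" = some "deinem" from by decide]
        apply String.toList_inj.mp
        simp only [String.toList_append, PySem.Str.toList_slice, PySem.Chars.slice_eq_listSlice, String.toList_ofList]
        rw [PySem.List.slice_from _ (by norm_num)]
        show ("deinem " : String).toList ++ (PySem.Str.strip text).toList.drop 7 = _
        rw [hd]
        simp
      by_cases h5 : (PySem.Str.strip text).toList.takeWhile (· != ' ') = "Meiner".toList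
      · have hb1 : ¬ (PySem.Str.startswith (PySem.Str.strip text) "Mein " = true) := fun hx => h1 (((hstart "Mein".toList "Mein " (pv_all_ne_space _ (by decide)) (by decide)).mp hx).2.trans (by decide))
        have hb2 : ¬ (PySem.Str.startswith (PySem.Str.strip text) "Meine " = true) := fun hx => h2 (((hstart "Meine".toList "Meine " (pv_all_ne_space _ (by decide)) (by decide)).mp hx).2.trans (by decide))
        have hb3 : ¬ (PySem.Str.startswith (PySem.Str.strip text) "Meinen " = true) := fun hx => h3 (((hstart "Meinen".toList "Meinen " (pv_all_ne_space _ (by decide)) (by decide)).mp hx).2.trans (by decide))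
        have hb4 : ¬ (PySem.Str.startswith (PySem.Str.strip text) "Meinem " = true) := fun hx => h4 (((hstart "Meinem".toList "Meinem " (pv_all_ne_space _ (by decide)) (by decide)).mp hx).2.trans (by decide))
        have hb5 : PySem.Str.startswith (PySem.Str.strip text) "Meiner " = true := (hstart "Meiner".toList "Meiner " (pv_all_ne_space _ (by decide)) (by decide)).mpr ⟨hm, h5⟩
        have hd : (PySem.Str.strip text).toList.drop 7 = ((PySem.Str.strip text).toList.dropWhile (· != ' ')).tail := pv_drop_eq_tail "Meiner".toList _ hm h5 (pv_all_ne_space _ (by decide))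
        rw [if_neg hb1, if_neg hb2, if_neg hb3, if_neg hb4, if_pos hb5]
        rw [show String.ofList ((PySem.Str.strip text).toList.takeWhile (· != ' ')) = "Meiner" from by rw [h5, String.ofList_toList]]
        simp only [show PySem.Dict.get? pvPossessiveHeads "Meiner" = some "deiner" from by decide]
        apply String.toList_inj.mp
        simp only [String.toList_append, PySem.Str.toList_slice, PySem.Chars.slice_eq_listSlice, String.toList_ofList]
        rw [PySem.List.slice_from _ (by norm_num)]
        show ("deiner " : String).toList ++ (PySem.Str.strip text).toList.drop 7 = _
        rw [hd]
        simp
      by_cases h6 : (PySem.Str.strip text).toList.takeWhile (· != ' ') = "Meines".toList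
      · have hb1 : ¬ (PySem.Str.startswith (PySem.Str.strip text) "Mein " = true) := fun hx => h1 (((hstart "Mein".toList "Mein " (pv_all_ne_space _ (by decide)) (by decide)).mp hx).2.trans (by decide))
        have hb2 : ¬ (PySem.Str.startswith (PySem.Str.strip text) "Meine " = true) := fun hx => h2 (((hstart "Meine".toList "Meine " (pv_all_ne_space _ (by decide)) (by decide)).mp hx).2.trans (by decide))
        have hb3 : ¬ (PySem.Str.startswith (PySem.Str.strip text) "Meinen " = true) := fun hx => h3 (((hstart "Meinen".toList "Meinen " (pv_all_ne_space _ (by decide)) (by decide)).mp hx).2.trans (by decide))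
        have hb4 : ¬ (PySem.Str.startswith (PySem.Str.strip text) "Meinem " = true) := fun hx => h4 (((hstart "Meinem".toList "Meinem " (pv_all_ne_space _ (by decide)) (by decide)).mp hx).2.trans (by decide))
        have hb5 : ¬ (PySem.Str.startswith (PySem.Str.strip text) "Meiner " = true) := fun hx => h5 (((hstart "Meiner".toList "Meiner " (pv_all_ne_space _ (by decide)) (by decide)).mp hx).2.trans (by decide))
        have hb6 : PySem.Str.startswith (PySem.Str.strip text) "Meines " = true := (hstart "Meines".toList "Meines " (pv_all_ne_space _ (by decide)) (by decide)).mpr ⟨hm, h6⟩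
        have hd : (PySem.Str.strip text).toList.drop 7 = ((PySem.Str.strip text).toList.dropWhile (· != ' ')).tail := pv_drop_eq_tail "Meines".toList _ hm h6 (pv_all_ne_space _ (by decide))
        rw [if_neg hb1, if_neg hb2, if_neg hb3, if_neg hb4, if_neg hb5, if_pos hb6]
        rw [show String.ofList ((PySem.Str.strip text).toList.takeWhile (· != ' ')) = "Meines" from by rw [h6, String.ofList_toList]]
        simp only [show PySem.Dict.get? pvPossessiveHeads "Meines" = some "deines" from by decide]
        apply String.toList_inj.mp
        simp only [String.toList_append, PySem.Str.toList_slice, PySem.Chars.slice_eq_listSlice, String.toList_ofList]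
        rw [PySem.List.slice_from _ (by norm_num)]
        show ("deines " : String).toList ++ (PySem.Str.strip text).toList.drop 7 = _
        rw [hd]
        simp
      · have hb1 : ¬ (PySem.Str.startswith (PySem.Str.strip text) "Mein " = true) := fun hx => h1 (((hstart "Mein".toList "Mein " (pv_all_ne_space _ (by decide)) (by decide)).mp hx).2.trans (by decide))
        have hb2 : ¬ (PySem.Str.startswith (PySem.Str.strip text) "Meine " = true) := fun hx => h2 (((hstart "Meine".toList "Meine " (pv_all_ne_space _ (by decide)) (by decide)).mp hx).2.trans (by decide))
        have hb3 : ¬ (PySem.Str.startswith (PySem.Str.strip text) "Meinen " = true) := fun hx => h3 (((hstart "Meinen".toList "Meinen " (pv_all_ne_space _ (by decide)) (by decide)).mp hx).2.trans (by decide))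
        have hb4 : ¬ (PySem.Str.startswith (PySem.Str.strip text) "Meinem " = true) := fun hx => h4 (((hstart "Meinem".toList "Meinem " (pv_all_ne_space _ (by decide)) (by decide)).mp hx).2.trans (by decide))
        have hb5 : ¬ (PySem.Str.startswith (PySem.Str.strip text) "Meiner " = true) := fun hx => h5 (((hstart "Meiner".toList "Meiner " (pv_all_ne_space _ (by decide)) (by decide)).mp hx).2.trans (by decide))
        have hb6 : ¬ (PySem.Str.startswith (PySem.Str.strip text) "Meines " = true) := fun hx => h6 (((hstart "Meines".toList "Meines " (pv_all_ne_space _ (by decide)) (by decide)).mp hx).2.trans (by decide))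
        have n1 : ¬ (("Mein" == String.ofList ((PySem.Str.strip text).toList.takeWhile (· != ' '))) = true) := fun hx => h1 (by have h3 := congrArg String.toList (beq_iff_eq.mp hx).symm; rw [String.toList_ofList] at h3; exact h3)
        have n2 : ¬ (("Meine" == String.ofList ((PySem.Str.strip text).toList.takeWhile (· != ' '))) = true) := fun hx => h2 (by have h3 := congrArg String.toList (beq_iff_eq.mp hx).symm; rw [String.toList_ofList] at h3; exact h3)
        have n3 : ¬ (("Meinen" == String.ofList ((PySem.Str.strip text).toList.takeWhile (· != ' '))) = true) := fun hx => h3 (by have h3 := congrArg String.toList (beq_iff_eq.mp hx).symm; rw [String.toList_ofList] at h3; exact h3)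
        have n4 : ¬ (("Meinem" == String.ofList ((PySem.Str.strip text).toList.takeWhile (· != ' '))) = true) := fun hx => h4 (by have h3 := congrArg String.toList (beq_iff_eq.mp hx).symm; rw [String.toList_ofList] at h3; exact h3)
        have n5 : ¬ (("Meiner" == String.ofList ((PySem.Str.strip text).toList.takeWhile (· != ' '))) = true) := fun hx => h5 (by have h3 := congrArg String.toList (beq_iff_eq.mp hx).symm; rw [String.toList_ofList] at h3; exact h3)
        have n6 : ¬ (("Meines" == String.ofList ((PySem.Str.strip text).toList.takeWhile (· != ' '))) = true) := fun hx => h6 (by have h3 := congrArg String.toList (beq_iff_eq.mp hx).symm; rw [String.toList_ofList] at h3; exact h3)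
        rw [if_neg hb1, if_neg hb2, if_neg hb3, if_neg hb4, if_neg hb5, if_neg hb6]
        have hget : PySem.Dict.get? pvPossessiveHeads (String.ofList ((PySem.Str.strip text).toList.takeWhile (· != ' '))) = none := by
          rw [pvPossessiveHeadsItems, PySem.Dict.get?_mk_cons, if_neg n1, PySem.Dict.get?_mk_cons, if_neg n2, PySem.Dict.get?_mk_cons, if_neg n3, PySem.Dict.get?_mk_cons, if_neg n4, PySem.Dict.get?_mk_cons, if_neg n5, PySem.Dict.get?_mk_cons, if_neg n6]
          rfl
        simp only [PySem.Str.toList_strip] at hget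
        simp [hget]
    · rw [hsplit, if_neg hm]
      simp only [List.map_cons, List.map_nil]
      have hb1 : ¬ (PySem.Str.startswith (PySem.Str.strip text) "Mein " = true) := fun hx => hm ((hstart "Mein".toList "Mein " (pv_all_ne_space _ (by decide)) (by decide)).mp hx).1
      have hb2 : ¬ (PySem.Str.startswith (PySem.Str.strip text) "Meine " = true) := fun hx => hm ((hstart "Meine".toList "Meine " (pv_all_ne_space _ (by decide)) (by decide)).mp hx).1
      have hb3 : ¬ (PySem.Str.startswith (PySem.Str.strip text) "Meinen " = true) := fun hx => hm ((hstart "Meinen".toList "Meinen " (pv_all_ne_space _ (by decide)) (by decide)).mp hx).1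
      have hb4 : ¬ (PySem.Str.startswith (PySem.Str.strip text) "Meinem " = true) := fun hx => hm ((hstart "Meinem".toList "Meinem " (pv_all_ne_space _ (by decide)) (by decide)).mp hx).1
      have hb5 : ¬ (PySem.Str.startswith (PySem.Str.strip text) "Meiner " = true) := fun hx => hm ((hstart "Meiner".toList "Meiner " (pv_all_ne_space _ (by decide)) (by decide)).mp hx).1
      have hb6 : ¬ (PySem.Str.startswith (PySem.Str.strip text) "Meines " = true) := fun hx => hm ((hstart "Meines".toList "Meines " (pv_all_ne_space _ (by decide)) (by decide)).mp hx).1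
      rw [if_neg hb1, if_neg hb2, if_neg hb3, if_neg hb4, if_neg hb5, if_neg hb6]
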